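-- pv_equiv track=rewrite | github.com/raresrosca/CtCI | leetcodes/trapping_rain_water.py | count_water
-- ===== SOURCE A (Python) =====
-- def count_water(mat):
--     counter = 0
--     for i in range(len(mat)):
--         for j in range(len(mat[0])):
--             if mat[i][j] == 0:
--                 if sum(mat[i][:j]) >= 1 and sum(mat[i][j:]) >= 1:
--                     counter += 1
--     return counter
-- ===== SOURCE B (Python) =====
-- def count_water(mat):
--     # one pass per row: running prefix sum + row total instead of re-summing slices
--     if not mat:
--         return 0
--     m = len(mat[0])
--     counter = 0
--     for row in mat:
--         total = sum(row)
--         pre = 0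
--         for x in row[:m]:
--             if x == 0 and pre >= 1 and total - pre >= 1:
--                 counter += 1
--             pre += x
--     return counter
-- ===== Notes on version B (the rewrite author's own statement) =====
-- stated objective: alternative
-- what changed: Replaces the per-cell slice re-summation (sum(mat[i][:j]) and sum(mat[i][j:]) for every zero cell) by a single pass per row maintaining a running prefix sum together with the precomputed row total.
import Mathlib
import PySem

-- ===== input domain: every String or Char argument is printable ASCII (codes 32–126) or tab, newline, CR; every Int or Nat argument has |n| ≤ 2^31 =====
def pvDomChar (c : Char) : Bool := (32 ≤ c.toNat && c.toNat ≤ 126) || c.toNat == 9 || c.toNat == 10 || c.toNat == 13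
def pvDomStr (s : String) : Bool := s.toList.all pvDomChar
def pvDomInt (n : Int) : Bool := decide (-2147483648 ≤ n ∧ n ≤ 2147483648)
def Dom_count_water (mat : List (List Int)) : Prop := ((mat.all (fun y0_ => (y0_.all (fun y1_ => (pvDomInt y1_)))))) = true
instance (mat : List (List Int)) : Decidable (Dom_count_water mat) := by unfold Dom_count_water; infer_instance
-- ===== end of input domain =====

-- B replaces A's per-cell slice re-summation by one pass per row with a running
-- prefix sum and the precomputed row total (objective: alternative algorithm).

-- ===== PORT A =====
def count_water (mat : List (List Int)) : Int :=
  (PySem.List.pyRange 0 (mat.length : Int) 1).foldl (fun counter i =>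
    (PySem.List.pyRange 0 (((PySem.List.pyGetD mat 0 []).length : Int)) 1).foldl (fun counter j =>
      if PySem.List.pyGetD (PySem.List.pyGetD mat i []) j 0 = 0 then
        if (PySem.List.slice (PySem.List.pyGetD mat i []) none (some j)).sum ≥ 1 ∧
           (PySem.List.slice (PySem.List.pyGetD mat i []) (some j) none).sum ≥ 1 then
          counter + 1
        else counter
      else counter) counter) 0

-- ===== PORT B =====
def count_water_alt (mat : List (List Int)) : Int :=
  match mat with
  | [] => 0
  | r :: _ =>
    let m := r.length
    mat.foldl (fun counter row =>
      let total := row.sum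
      ((PySem.List.slice row none (some (m : Int))).foldl
        (fun (p : Int × Int) x =>
          (if x = 0 ∧ p.2 ≥ 1 ∧ total - p.2 ≥ 1 then p.1 + 1 else p.1, p.2 + x))
        (counter, 0)).1) 0

-- ===== PRECONDITION & SPEC =====
-- Pre_ excludes matrices with a row shorter than the first row: there the Python A
-- itself raises IndexError on mat[i][j].
def Pre_count_water (mat : List (List Int)) : Prop :=
  ∀ row ∈ mat, (mat.headD []).length ≤ row.length
instance (mat : List (List Int)) : Decidable (Pre_count_water mat) := by
  unfold Pre_count_water; infer_instance
def pvWitness_count_water : List (List Int) := [[1, 0, 1], [2, 0, 0, 1]]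

def Spec_count_water (mat : List (List Int)) (out : Int) : Prop := out = count_water_alt mat
instance (mat : List (List Int)) (out : Int) : Decidable (Spec_count_water mat out) := by
  unfold Spec_count_water; infer_instance

-- ===== CLAIM (what is proved, stated in full; the proofs are below) =====
def Claim_equal_count_water : Prop :=
  ∀ (mat : List (List Int)), Dom_count_water mat → Pre_count_water mat →
    Spec_count_water mat (count_water mat)

-- ===== LEMMAS AND PROOFS =====

/-- row count with running prefix `pre` and row total `t`. -/
def fRow : List Int → Int → Int → Int
  | [], _, _ => 0
  | x :: xs, pre, t => (if x = 0 ∧ pre ≥ 1 ∧ t - pre ≥ 1 then 1 else 0) + fRow xs (pre + x) t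

theorem fRow_append (l : List Int) (x : Int) (pre t : Int) :
    fRow (l ++ [x]) pre t
      = fRow l pre t + (if x = 0 ∧ pre + l.sum ≥ 1 ∧ t - (pre + l.sum) ≥ 1 then 1 else 0) := by
  induction l generalizing pre with
  | nil => simp [fRow]
  | cons y ys ih =>
      simp only [List.cons_append, fRow, ih, List.sum_cons, ← add_assoc]

theorem b_inner (t : Int) (l : List Int) (c pre : Int) :
    (l.foldl (fun (p : Int × Int) x =>
        (if x = 0 ∧ p.2 ≥ 1 ∧ t - p.2 ≥ 1 then p.1 + 1 else p.1, p.2 + x)) (c, pre)).1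
      = c + fRow l pre t := by
  induction l generalizing c pre with
  | nil => simp [fRow]
  | cons x xs ih =>
      simp only [List.foldl_cons, fRow, ih]
      split_ifs <;> ring

theorem a_inner (row : List Int) (m : Nat) (hm : m ≤ row.length) (c : Int) :
    (PySem.List.pyRange 0 (m : Int) 1).foldl (fun counter j =>
      if PySem.List.pyGetD row j 0 = 0 then
        if (PySem.List.slice row none (some j)).sum ≥ 1 ∧
           (PySem.List.slice row (some j) none).sum ≥ 1 then
          counter + 1
        else counter
      else counter) c
      = c + fRow (row.take m) 0 row.sum := by
  induction m generalizing c with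
  | zero => simp [PySem.List.pyRange_one_eq_nil, fRow]
  | succ m ih =>
      have hm' : m < row.length := Nat.lt_of_lt_of_le (Nat.lt_succ_self m) hm
      have hstep : ((m + 1 : Nat) : Int) = (m : Int) + 1 := by push_cast; ring
      rw [hstep, PySem.List.pyRange_one_succ_right (by positivity), List.foldl_append,
        ih (Nat.le_of_succ_le hm)]
      have htake : row.take (m + 1) = row.take m ++ [row[m]] := by
        rw [List.take_add_one]; simp [List.getElem?_eq_getElem hm']
      have hsum : (row.take m).sum + (row.drop m).sum = row.sum := by
        rw [← List.sum_append, List.take_append_drop]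
      simp only [List.foldl_cons, List.foldl_nil, PySem.List.pyGetD_natCast,
        PySem.List.slice_to_natCast, PySem.List.slice_from_natCast,
        List.getD_eq_getElem?_getD, List.getElem?_eq_getElem hm', htake,
        fRow_append, Option.getD_some, zero_add]
      split_ifs <;> omega

theorem a_rows (mat : List (List Int)) (m : Nat) (c : Int)
    (h : ∀ row ∈ mat, m ≤ row.length) :
    mat.foldl (fun counter row =>
      (PySem.List.pyRange 0 (m : Int) 1).foldl (fun counter j =>
        if PySem.List.pyGetD row j 0 = 0 then
          if (PySem.List.slice row none (some j)).sum ≥ 1 ∧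
             (PySem.List.slice row (some j) none).sum ≥ 1 then
            counter + 1
          else counter
        else counter) counter) c
      = mat.foldl (fun counter row => counter + fRow (row.take m) 0 row.sum) c := by
  induction mat generalizing c with
  | nil => rfl
  | cons row rest ih =>
      simp only [List.foldl_cons]
      rw [a_inner row m (h row (List.mem_cons_self)) c]
      exact ih _ (fun r hr => h r (List.mem_cons_of_mem _ hr))

-- ===== VERDICT (by name: the statement is the Claim_ definition above) =====
theorem count_water_spec : Claim_equal_count_water := by
  intro mat _ hlen
  unfold Spec_count_water
  cases mat with
  | nil => decide
  | cons r rest =>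
    unfold count_water count_water_alt
    have hhead : PySem.List.pyGetD (r :: rest) 0 [] = r := by
      simp [PySem.List.pyGetD_zero_cons]
    simp only [hhead]
    have hlen' : ∀ row ∈ (r :: rest), r.length ≤ row.length := by
      intro row hr; simpa using hlen row hr
    rw [PySem.List.foldl_pyRange_zero_pyGetD' (r :: rest) []
      (fun counter row =>
        (PySem.List.pyRange 0 (r.length : Int) 1).foldl (fun counter j =>
          if PySem.List.pyGetD row j 0 = 0 then
            if (PySem.List.slice row none (some j)).sum ≥ 1 ∧
               (PySem.List.slice row (some j) none).sum ≥ 1 then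
              counter + 1
            else counter
          else counter) counter) 0]
    rw [a_rows (r :: rest) r.length 0 hlen']
    simp only [PySem.List.slice_to_natCast]
    apply PySem.List.foldl_congr_mem
    intro c row _
    rw [b_inner row.sum (row.take r.length) c 0]
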